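-- pv_equiv track=rewrite | github.com/amkil728/projects | crossing_mean_v2.py | sign_change_gaps
-- ===== SOURCE A (Python) =====
-- def sign(n):
--     if n > 0:
--         return 1
--     elif n < 0:
--         return -1
--     else:
--         return 0
--
-- def sign_change_gaps(a_list):
--     start_index = -1
--
--     # Find index of first non-zero value and its sign
--     for index, item in enumerate(a_list):
--             if item:
--                 start_index = index
--                 start_sign = 1 if item > 0 else -1
--                 break
--
--     # If start_index is -1, all items are zero, and there is no change of sign at all
--     if start_index == -1:
--         return []
--
--     # List of gaps
--     gaps = list()
--
--     # While start_index < length of list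
--     while start_index < len(a_list):
--         gap = 0 # Default value for gap, if no sign change found
--
--         # Start looking for sign change
--         for index in range(start_index, len(a_list)):
--                 # Get item at index
--                 item = a_list[index]
--                 # If sign of item is different from sign_first and item is not 0
--                 # we have found a sign change
--                 if sign(item) != start_sign and sign(item) != 0:
--                     gap = index - start_index
--                     gaps.append(gap)
--                     break
--
--         # If gap = 0, no sign change found
--         if gap == 0:
--             break
--
--         start_index, start_sign = index, sign(item)
--
--     return gaps
-- ===== SOURCE B (Python) =====
-- def sign_change_gaps(a_list):
--     # One forward pass collecting sign-change positions, then take consecutive differences.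
--     positions = []
--     cur = 0
--     for i, item in enumerate(a_list):
--         if not positions:
--             if item:
--                 positions.append(i)
--                 cur = 1 if item > 0 else -1
--         else:
--             s = 1 if item > 0 else (-1 if item < 0 else 0)
--             if s != 0 and s != cur:
--                 positions.append(i)
--                 cur = s
--     return [positions[j + 1] - positions[j] for j in range(len(positions) - 1)]
-- ===== Notes on version B (the rewrite author's own statement) =====
-- stated objective: simpler
-- what changed: Replaces A's restart-the-inner-scan while loop with a single forward pass that collects the list of sign-change positions and then returns its consecutive differences.
import Mathlib
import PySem

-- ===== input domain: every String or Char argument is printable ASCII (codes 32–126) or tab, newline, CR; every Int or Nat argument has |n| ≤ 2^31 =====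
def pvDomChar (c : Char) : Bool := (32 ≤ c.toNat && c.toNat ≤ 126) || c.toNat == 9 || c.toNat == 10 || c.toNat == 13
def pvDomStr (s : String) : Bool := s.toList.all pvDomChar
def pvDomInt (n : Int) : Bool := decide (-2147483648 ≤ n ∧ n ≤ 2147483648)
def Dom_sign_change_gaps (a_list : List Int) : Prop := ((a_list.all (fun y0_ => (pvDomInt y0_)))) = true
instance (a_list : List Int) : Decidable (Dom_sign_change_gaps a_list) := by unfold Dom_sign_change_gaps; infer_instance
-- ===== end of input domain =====

-- B collects the list of sign-change positions in one pass and returns its consecutive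
-- differences, instead of A's restart-the-inner-scan while loop (objective: simpler).

-- ===== PORT A =====
def pySign (n : Int) : Int := if n > 0 then 1 else if n < 0 then -1 else 0

-- first for-loop: index and value of the first truthy element
def findFirstNZ : List Int → Nat → Option (Nat × Int)
  | [], _ => none
  | x :: xs, i => if x ≠ 0 then some (i, x) else findFirstNZ xs (i + 1)

-- inner for-loop over range(start_index, len(a_list)); returns (index, item) at the break
def innerScan (a : List Int) (s : Int) (i : Nat) : Option (Nat × Int) :=
  if h : i < a.length then
    let item := a[i]
    if pySign item ≠ s ∧ pySign item ≠ 0 then some (i, item)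
    else innerScan a s (i + 1)
  else none
termination_by a.length - i

-- the while loop; fuel bounds the iteration count (start_index strictly increases)
def outerLoop (a : List Int) : Nat → Nat → Int → List Int → List Int
  | 0, _, _, gaps => gaps
  | fuel + 1, start, s, gaps =>
    if start < a.length then
      match innerScan a s start with
      | none => gaps
      | some (idx, item) =>
        let gap : Int := (idx : Int) - (start : Int)
        let gaps' := gaps ++ [gap]
        if gap = 0 then gaps'
        else outerLoop a fuel idx (pySign item) gaps'
    else gaps

def sign_change_gaps (a_list : List Int) : List Int :=
  match findFirstNZ a_list 0 with
  | none => []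
  | some (k, item) =>
    outerLoop a_list (a_list.length + 1) k (if item > 0 then 1 else -1) []

-- ===== PORT B =====
-- the single for-loop of Source B: state = (positions, cur)
def scanB : List Int → Int → List Int → Int → List Int
  | [], _, ps, _ => ps
  | x :: xs, i, ps, cur =>
    if ps.isEmpty then
      if x ≠ 0 then scanB xs (i + 1) (ps ++ [i]) (if x > 0 then 1 else -1)
      else scanB xs (i + 1) ps cur
    else
      let s : Int := if x > 0 then 1 else if x < 0 then -1 else 0
      if s ≠ 0 ∧ s ≠ cur then scanB xs (i + 1) (ps ++ [i]) s
      else scanB xs (i + 1) ps cur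

def sign_change_gaps_alt (a_list : List Int) : List Int :=
  let ps := scanB a_list 0 [] 0
  (List.range (ps.length - 1)).map (fun j => ps.getD (j + 1) 0 - ps.getD j 0)

-- ===== PRECONDITION & SPEC =====
def Spec_sign_change_gaps (a_list : List Int) (out : List Int) : Prop := out = sign_change_gaps_alt a_list
instance (a_list : List Int) (out : List Int) : Decidable (Spec_sign_change_gaps a_list out) := by unfold Spec_sign_change_gaps; infer_instance

-- ===== CLAIM (what is proved, stated in full; the proofs are below) =====
def Claim_equal_sign_change_gaps : Prop := ∀ (a_list : List Int), Dom_sign_change_gaps a_list → Spec_sign_change_gaps a_list (sign_change_gaps a_list)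

-- ===== LEMMAS AND PROOFS =====

-- reference: list of sign-change positions after the initial one (index carried as Int)
def C : List Int → Int → Int → List Int
  | [], _, _ => []
  | x :: xs, cur, i =>
    if pySign x ≠ cur ∧ pySign x ≠ 0 then i :: C xs (pySign x) (i + 1)
    else C xs cur (i + 1)

-- reference: the full positions list
def P : List Int → Int → List Int
  | [], _ => []
  | x :: xs, i => if x ≠ 0 then i :: C xs (pySign x) (i + 1) else P xs (i + 1)

-- adjacent differences
def diffs : List Int → List Int
  | p :: q :: rest => (q - p) :: diffs (q :: rest)
  | _ => []

lemma rangeDiff_eq (ps : List Int) :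
    (List.range (ps.length - 1)).map (fun j => ps.getD (j + 1) 0 - ps.getD j 0) = diffs ps := by
  match ps with
  | [] => simp [diffs]
  | [p] => simp [diffs]
  | p :: q :: rest =>
    have ih := rangeDiff_eq (q :: rest)
    simp only [List.length_cons, Nat.add_sub_cancel] at ih ⊢
    rw [List.range_succ_eq_map]
    simp only [List.map_cons, List.map_map]
    have hmap : ((fun j => (p :: q :: rest).getD (j + 1) 0 - (p :: q :: rest).getD j 0) ∘ Nat.succ)
        = (fun j => (q :: rest).getD (j + 1) 0 - (q :: rest).getD j 0) := by
      funext j; simp [Function.comp]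
    rw [hmap, ih]
    simp [diffs]

lemma innerScan_some (a : List Int) (s : Int) :
    ∀ (i idx : Nat) (item : Int), innerScan a s i = some (idx, item) →
      i ≤ idx ∧ idx < a.length ∧ a.getD idx 0 = item ∧ pySign item ≠ s ∧ pySign item ≠ 0 := by
  intro i
  induction' hn : a.length - i using Nat.strong_induction_on with n IH generalizing i
  intro idx item h
  rw [innerScan] at h
  by_cases hlt : i < a.length
  · rw [dif_pos hlt] at h
    change (if pySign a[i] ≠ s ∧ pySign a[i] ≠ 0 then some (i, a[i])
      else innerScan a s (i + 1)) = some (idx, item) at h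
    by_cases hcond : pySign a[i] ≠ s ∧ pySign a[i] ≠ 0
    · rw [if_pos hcond] at h
      obtain ⟨hi, hit⟩ : i = idx ∧ a[i] = item := by
        have := Option.some.inj h
        exact ⟨congrArg Prod.fst this, congrArg Prod.snd this⟩
      subst hi; subst hit
      exact ⟨le_refl _, hlt, (List.getD_eq_getElem a 0 hlt), hcond.1, hcond.2⟩
    · rw [if_neg hcond] at h
      have := IH (a.length - (i + 1)) (by omega) (i + 1) rfl idx item h
      exact ⟨by omega, this.2⟩
  · rw [dif_neg hlt] at h
    exact absurd h (by simp)

lemma innerScan_skip (a : List Int) (s : Int) (i : Nat) (h : i < a.length)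
    (hs : pySign (a.getD i 0) = s) :
    innerScan a s i = innerScan a s (i + 1) := by
  rw [innerScan, dif_pos h]
  change (if pySign a[i] ≠ s ∧ pySign a[i] ≠ 0 then some (i, a[i])
    else innerScan a s (i + 1)) = innerScan a s (i + 1)
  rw [if_neg]
  rw [(List.getD_eq_getElem a 0 h).symm, hs]
  simp

lemma C_drop (a : List Int) (s : Int) :
    ∀ i : Nat, C (a.drop i) s (i : Int) =
      (match innerScan a s i with
       | none => []
       | some (idx, item) => (idx : Int) :: C (a.drop (idx + 1)) (pySign item) ((idx : Int) + 1)) := by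
  intro i
  induction' hn : a.length - i using Nat.strong_induction_on with n IH generalizing s i
  by_cases h : i < a.length
  · rw [List.drop_eq_getElem_cons h]
    rw [innerScan, dif_pos h]
    change C (a[i] :: a.drop (i + 1)) s (i : Int) =
      (match (if pySign a[i] ≠ s ∧ pySign a[i] ≠ 0 then some (i, a[i])
        else innerScan a s (i + 1)) with
       | none => []
       | some (idx, item) => (idx : Int) :: C (a.drop (idx + 1)) (pySign item) ((idx : Int) + 1))
    by_cases hc : pySign a[i] ≠ s ∧ pySign a[i] ≠ 0
    · rw [if_pos hc]
      simp [C, if_pos hc]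
    · rw [if_neg hc]
      have := IH (a.length - (i + 1)) (by omega) s (i + 1) rfl
      simp only [C, if_neg hc]
      push_cast at this ⊢
      exact this
  · rw [List.drop_eq_nil_of_le (by omega), innerScan, dif_neg h]
    simp [C]

lemma outer_eq (a : List Int) :
    ∀ (fuel start : Nat) (s : Int) (gaps : List Int),
      start < a.length → a.length - start < fuel → s = pySign (a.getD start 0) →
      outerLoop a fuel start s gaps =
        gaps ++ diffs ((start : Int) :: C (a.drop (start + 1)) s ((start : Int) + 1)) := by
  intro fuel
  induction fuel with
  | zero => intro start s gaps h1 h2 _; omega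
  | succ fuel IH =>
    intro start s gaps h1 h2 hs
    rw [outerLoop, if_pos h1]
    rw [innerScan_skip a s start h1 hs.symm]
    have hC := C_drop a s (start + 1)
    push_cast at hC
    cases hscan : innerScan a s (start + 1) with
    | none =>
      rw [hscan] at hC
      simp only at hC
      rw [hC]
      simp [diffs]
    | some pr =>
      obtain ⟨idx, item⟩ := pr
      rw [hscan] at hC
      simp only at hC
      obtain ⟨hge, hlt, hitem, hne, hnz⟩ := innerScan_some a s (start + 1) idx item hscan
      rw [hC]
      have hgap : ((idx : Int) - (start : Int)) ≠ 0 := by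
        have : start + 1 ≤ idx := hge
        omega
      simp only [if_neg hgap]
      rw [IH idx (pySign item) (gaps ++ [(idx : Int) - (start : Int)]) hlt (by omega)
        (by rw [hitem])]
      simp [diffs]

lemma first_gen (a : List Int) :
    ∀ i : Nat,
      (match findFirstNZ (a.drop i) i with
       | none => ([] : List Int)
       | some (k, item) => outerLoop a (a.length + 1) k (if item > 0 then 1 else -1) []) =
      diffs (P (a.drop i) (i : Int)) := by
  intro i
  induction' hn : a.length - i using Nat.strong_induction_on with n IH generalizing i
  by_cases h : i < a.length
  · rw [List.drop_eq_getElem_cons h]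
    by_cases hz : a[i] ≠ 0
    · simp only [findFirstNZ, if_pos hz, P, if_pos hz]
      have hsgn : (if a[i] > 0 then (1 : Int) else -1) = pySign (a.getD i 0) := by
        rw [List.getD_eq_getElem a 0 h]
        unfold pySign
        rcases lt_trichotomy (a[i]) 0 with hlt | heq | hgt
        · simp [not_lt.mpr (le_of_lt hlt), hlt]
        · exact absurd heq hz
        · simp [hgt]
      rw [hsgn, outer_eq a (a.length + 1) i (pySign (a.getD i 0)) [] h (by omega) rfl]
      rw [List.getD_eq_getElem a 0 h]
      simp
    · push_neg at hz
      have h1 : findFirstNZ (a[i] :: a.drop (i + 1)) i = findFirstNZ (a.drop (i + 1)) (i + 1) := by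
        simp [findFirstNZ, hz]
      have h2 : P (a[i] :: a.drop (i + 1)) (i : Int) = P (a.drop (i + 1)) ((i : Int) + 1) := by
        simp [P, hz]
      rw [h1, h2]
      have := IH (a.length - (i + 1)) (by omega) (i + 1) rfl
      push_cast at this ⊢
      exact this
  · rw [List.drop_eq_nil_of_le (by omega)]
    simp [findFirstNZ, P, diffs]

lemma scanB_ne (xs : List Int) :
    ∀ (i : Int) (ps : List Int) (cur : Int), ps ≠ [] →
      scanB xs i ps cur = ps ++ C xs cur i := by
  induction xs with
  | nil => intro i ps cur _; simp [scanB, C]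
  | cons x xs IH =>
    intro i ps cur hps
    rw [scanB]
    rw [if_neg (by simpa [List.isEmpty_iff] using hps)]
    have hsgn : (if x > 0 then (1 : Int) else if x < 0 then -1 else 0) = pySign x := rfl
    simp only [hsgn]
    by_cases hc : pySign x ≠ cur ∧ pySign x ≠ 0
    · rw [if_pos ⟨hc.2, hc.1⟩, IH (i + 1) (ps ++ [i]) (pySign x) (by simp)]
      simp [C, if_pos hc]
    · rw [if_neg (by tauto), IH (i + 1) ps cur hps]
      rw [show C (x :: xs) cur i = C xs cur (i + 1) by simp [C, if_neg hc]]

lemma scanB_nil (xs : List Int) :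
    ∀ (i cur : Int), scanB xs i [] cur = P xs i := by
  induction xs with
  | nil => intro i cur; simp [scanB, P]
  | cons x xs IH =>
    intro i cur
    rw [scanB]
    rw [if_pos (by simp)]
    by_cases hz : x ≠ 0
    · rw [if_pos hz, List.nil_append, scanB_ne xs (i + 1) [i] _ (by simp)]
      have hsgn : (if x > 0 then (1 : Int) else -1) = pySign x := by
        unfold pySign
        rcases lt_trichotomy x 0 with hlt | heq | hgt
        · simp [not_lt.mpr (le_of_lt hlt), hlt]
        · exact absurd heq hz
        · simp [hgt]
      rw [hsgn]
      simp [P, if_pos hz]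
    · push_neg at hz
      rw [if_neg (by simp [hz]), IH (i + 1) cur]
      simp [P, hz]

-- ===== VERDICT (by name: the statement is the Claim_ definition above) =====
theorem sign_change_gaps_spec : Claim_equal_sign_change_gaps := by
  intro a _
  unfold Spec_sign_change_gaps
  unfold sign_change_gaps_alt
  rw [scanB_nil, rangeDiff_eq]
  have := first_gen a 0
  simp only [List.drop_zero, Nat.cast_zero] at this
  rw [← this]
  rfl
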